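-- pv_equiv track=rewrite | github.com/Emasoft/enchant_cli | src/enchant_book_manager/chapter_detector.py | detect_issues
-- ===== SOURCE A (Python) =====
-- def detect_issues(seq: list[int]) -> list[str]:
--     """
--     Updated algorithm provided by user: reports missing, repeats, swaps,
--     out-of-place, duplicates.
--     """
--     if not seq:
--         return []
--
--     issues = []
--     start, end = seq[0], seq[-1]
--     prev_expected = start
--     seen = set()
--     reported_missing = set()
--
--     for idx, v in enumerate(seq):
--         # 1) Repeats: only on second+ occurrence
--         if v in seen:
--             # find nearest non-identical predecessor
--             try:
--                 pred = next(x for x in reversed(seq[:idx]) if x != v)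
--             except StopIteration:
--                 # No non-identical predecessor found (all previous values are the same)
--                 # Use the first value in sequence, or 0 if this is the first
--                 pred = seq[0] if idx > 0 and seq[0] != v else 0
--             # count run length from here
--             run_len = 1
--             j = idx
--             while j + 1 < len(seq) and seq[j + 1] == v:
--                 run_len += 1
--                 j += 1
--             t = "times" if run_len > 1 else "time"
--             issues.append((idx, f"number {v} is repeated {run_len} {t} after number {pred}"))
--         else:
--             seen.add(v)
--
--         # 2) Missing: jumped past some values
--         if v > prev_expected:
--             for m in range(prev_expected, v):
--                 if m not in reported_missing:
--                     issues.append((idx, f"number {m} is missing"))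
--                     reported_missing.add(m)
--             prev_expected = v + 1
--
--         # 3) Exact hit
--         elif v == prev_expected:
--             prev_expected += 1
--
--         # 4) Below expectation → swap or out-of-place
--         else:  # v < prev_expected
--             if idx > 0 and abs(seq[idx - 1] - v) == 1 and v < seq[idx - 1]:
--                 a, b = min(v, seq[idx - 1]), max(v, seq[idx - 1])
--                 issues.append((idx, f"number {a} is switched in place with number {b}"))
--                 issues.append((idx, f"number {b} is switched in place with number {a}"))
--             else:
--                 issues.append((idx, f"number {v} is out of place after number {seq[idx - 1]}"))
--             prev_expected = v + 1
--
--     # tail missing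
--     for m in range(prev_expected, end + 1):
--         if m not in reported_missing:
--             issues.append((len(seq), f"number {m} is missing"))
--
--     issues.sort(key=lambda x: x[0])
--     return [msg for _, msg in issues]
-- ===== SOURCE B (Python) =====
-- def detect_issues(seq: list[int]) -> list[str]:
--     """Single pass: precomputed run lengths, tracked predecessor, no tuples/sort."""
--     if not seq:
--         return []
--     n = len(seq)
--     # run lengths of the maximal equal run starting at each index, built right-to-left
--     runlen = [1]
--     for i in range(n - 2, -1, -1):
--         runlen.append(runlen[-1] + 1 if seq[i] == seq[i + 1] else 1)
--     runlen.reverse()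
--     out = []
--     prev_expected = seq[0]
--     seen = set()
--     reported = set()
--     last_diff = None  # nearest earlier element differing from the previous element
--     for idx, v in enumerate(seq):
--         if v in seen:
--             if seq[idx - 1] != v:
--                 pred = seq[idx - 1]
--             elif last_diff is not None:
--                 pred = last_diff
--             else:
--                 pred = 0
--             r = runlen[idx]
--             t = "times" if r > 1 else "time"
--             out.append(f"number {v} is repeated {r} {t} after number {pred}")
--         else:
--             seen.add(v)
--         if v > prev_expected:
--             for m in range(prev_expected, v):
--                 if m not in reported:
--                     out.append(f"number {m} is missing")
--                     reported.add(m)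
--             prev_expected = v + 1
--         elif v == prev_expected:
--             prev_expected += 1
--         else:
--             p = seq[idx - 1]
--             if v < p and p - v == 1:
--                 out.append(f"number {v} is switched in place with number {p}")
--                 out.append(f"number {p} is switched in place with number {v}")
--             else:
--                 out.append(f"number {v} is out of place after number {p}")
--             prev_expected = v + 1
--         if idx > 0 and seq[idx - 1] != v:
--             last_diff = seq[idx - 1]
--     for m in range(prev_expected, seq[-1] + 1):
--         if m not in reported:
--             out.append(f"number {m} is missing")
--     return out
-- ===== Notes on version B (the rewrite author's own statement) =====
-- stated objective: alternative
-- what changed: Replaces A's per-repeat backward scan for the predecessor and per-repeat while-loop run count with a tracked last-differing-element variable and a run-length array precomputed in one right-to-left pass, and drops the (idx,msg) tuples and final sort since messages are already emitted in index order.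
import Mathlib
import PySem

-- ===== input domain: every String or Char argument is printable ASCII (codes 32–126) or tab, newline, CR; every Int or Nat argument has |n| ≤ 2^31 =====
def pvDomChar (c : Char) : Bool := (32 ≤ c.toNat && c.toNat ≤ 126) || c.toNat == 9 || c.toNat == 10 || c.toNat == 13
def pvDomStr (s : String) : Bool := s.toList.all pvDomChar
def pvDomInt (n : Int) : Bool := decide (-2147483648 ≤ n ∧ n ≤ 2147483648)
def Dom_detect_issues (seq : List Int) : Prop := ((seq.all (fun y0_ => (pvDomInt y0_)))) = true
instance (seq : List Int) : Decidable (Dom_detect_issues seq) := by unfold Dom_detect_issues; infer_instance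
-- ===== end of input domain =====

-- B: one pass with a precomputed run-length array and a tracked last-differing-element
-- variable instead of A's per-repeat backward scans and recounts, and no (idx,msg) tuples/sort.

-- ===== PORT A =====
-- next(x for x in reversed(seq[:idx]) if x != v)  (some p = the generator yields p; none = StopIteration)
def pvFirstDiffRev (pre : List Int) (v : Int) : Option Int :=
  pre.reverse.find? (fun x => x != v)

-- the while loop counting the run length from index j (run_len accumulates)
def pvRunLen (seq : List Int) (v : Int) (j : Nat) (run_len : Int) : Int :=
  if h : j + 1 < seq.length ∧ seq.getD (j + 1) 0 = v then pvRunLen seq v (j + 1) (run_len + 1)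
  else run_len
termination_by seq.length - j
decreasing_by omega

-- the 'for idx, v in enumerate(seq)' loop of A; returns (issues, prev_expected, reported_missing)
def pvLoopA (seq : List Int) (rem : List Int) (idx : Nat) (issues : List (Nat × String))
    (pe : Int) (seen reported : PySem.Set Int) :
    List (Nat × String) × Int × PySem.Set Int :=
  match rem with
  | [] => (issues, pe, reported)
  | v :: rest =>
    let is1 :=
      if PySem.Set.contains seen v then
        let pred : Int :=
          match pvFirstDiffRev (PySem.List.slice seq none (some (idx : Int))) v with
          | some p => p
          | none =>
            if 0 < idx ∧ PySem.List.pyGetD seq 0 0 ≠ v then PySem.List.pyGetD seq 0 0 else 0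
        let run_len := pvRunLen seq v idx 1
        let t := if run_len > 1 then "times" else "time"
        (issues ++ [(idx, "number " ++ PySem.Int.toStr v ++ " is repeated " ++
            PySem.Int.toStr run_len ++ " " ++ t ++ " after number " ++ PySem.Int.toStr pred)],
         seen)
      else (issues, PySem.Set.add seen v)
    if v > pe then
      let st := (PySem.List.pyRange pe v 1).foldl
        (fun (st : List (Nat × String) × PySem.Set Int) m =>
          if PySem.Set.contains st.2 m then st
          else (st.1 ++ [(idx, "number " ++ PySem.Int.toStr m ++ " is missing")],
                PySem.Set.add st.2 m))
        (is1.1, reported)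
      pvLoopA seq rest (idx + 1) st.1 (v + 1) is1.2 st.2
    else if v = pe then
      pvLoopA seq rest (idx + 1) is1.1 (pe + 1) is1.2 reported
    else
      -- seq[idx - 1]: seq is nonempty here, so the Python index is in range and the default unused
      let pv := PySem.List.pyGetD seq ((idx : Int) - 1) 0
      let is2 :=
        if 0 < idx ∧ (pv - v).natAbs = 1 ∧ v < pv then
          let a := min v pv
          let b := max v pv
          is1.1 ++ [(idx, "number " ++ PySem.Int.toStr a ++ " is switched in place with number " ++
                      PySem.Int.toStr b),
                    (idx, "number " ++ PySem.Int.toStr b ++ " is switched in place with number " ++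
                      PySem.Int.toStr a)]
        else
          is1.1 ++ [(idx, "number " ++ PySem.Int.toStr v ++ " is out of place after number " ++
                      PySem.Int.toStr pv)]
      pvLoopA seq rest (idx + 1) is2 (v + 1) is1.2 reported

def detect_issues (seq : List Int) : List String :=
  match seq with
  | [] => []
  | _ :: _ =>
    let start := PySem.List.pyGetD seq 0 0
    let endv := PySem.List.pyGetD seq (-1) 0
    let r := pvLoopA seq seq 0 [] start PySem.Set.empty PySem.Set.empty
    let issues := (PySem.List.pyRange r.2.1 (endv + 1) 1).foldl
      (fun acc m =>
        if PySem.Set.contains r.2.2 m then acc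
        else acc ++ [(seq.length, "number " ++ PySem.Int.toStr m ++ " is missing")])
      r.1
    (PySem.List.sorted issues (fun x => x.1) false).map (fun x => x.2)

-- ===== PORT B =====
-- runlen = [1]; for i in range(n-2, -1, -1): runlen.append(...); runlen.reverse()
def pvBuildRunlen (seq : List Int) : List Int :=
  ((PySem.List.pyRange ((seq.length : Int) - 2) (-1) (-1)).foldl
    (fun acc i =>
      acc ++ [if PySem.List.pyGetD seq i 0 = PySem.List.pyGetD seq (i + 1) 0 then
                PySem.List.pyGetD acc (-1) 0 + 1
              else 1])
    [1]).reverse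

-- B's single main loop; ld is last_diff (None → none)
def pvLoopB (seq runlen : List Int) (rem : List Int) (idx : Nat) (out : List String)
    (pe : Int) (seen reported : PySem.Set Int) (ld : Option Int) :
    List String × Int × PySem.Set Int :=
  match rem with
  | [] => (out, pe, reported)
  | v :: rest =>
    let os1 :=
      if PySem.Set.contains seen v then
        let pred : Int :=
          if PySem.List.pyGetD seq ((idx : Int) - 1) 0 ≠ v then
            PySem.List.pyGetD seq ((idx : Int) - 1) 0
          else
            match ld with
            | some p => p
            | none => 0
        let r := PySem.List.pyGetD runlen (idx : Int) 0
        let t := if r > 1 then "times" else "time"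
        (out ++ ["number " ++ PySem.Int.toStr v ++ " is repeated " ++
            PySem.Int.toStr r ++ " " ++ t ++ " after number " ++ PySem.Int.toStr pred],
         seen)
      else (out, PySem.Set.add seen v)
    let ld' :=
      if 0 < idx ∧ PySem.List.pyGetD seq ((idx : Int) - 1) 0 ≠ v then
        some (PySem.List.pyGetD seq ((idx : Int) - 1) 0)
      else ld
    if v > pe then
      let st := (PySem.List.pyRange pe v 1).foldl
        (fun (st : List String × PySem.Set Int) m =>
          if PySem.Set.contains st.2 m then st
          else (st.1 ++ ["number " ++ PySem.Int.toStr m ++ " is missing"],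
                PySem.Set.add st.2 m))
        (os1.1, reported)
      pvLoopB seq runlen rest (idx + 1) st.1 (v + 1) os1.2 st.2 ld'
    else if v = pe then
      pvLoopB seq runlen rest (idx + 1) os1.1 (pe + 1) os1.2 reported ld'
    else
      let p := PySem.List.pyGetD seq ((idx : Int) - 1) 0
      let os2 :=
        if v < p ∧ p - v = 1 then
          os1.1 ++ ["number " ++ PySem.Int.toStr v ++ " is switched in place with number " ++
                      PySem.Int.toStr p,
                    "number " ++ PySem.Int.toStr p ++ " is switched in place with number " ++
                      PySem.Int.toStr v]
        else
          os1.1 ++ ["number " ++ PySem.Int.toStr v ++ " is out of place after number " ++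
                      PySem.Int.toStr p]
      pvLoopB seq runlen rest (idx + 1) os2 (v + 1) os1.2 reported ld'

def detect_issues_alt (seq : List Int) : List String :=
  match seq with
  | [] => []
  | _ :: _ =>
    let runlen := pvBuildRunlen seq
    let r := pvLoopB seq runlen seq 0 [] (PySem.List.pyGetD seq 0 0)
      PySem.Set.empty PySem.Set.empty none
    (PySem.List.pyRange r.2.1 (PySem.List.pyGetD seq (-1) 0 + 1) 1).foldl
      (fun acc m =>
        if PySem.Set.contains r.2.2 m then acc
        else acc ++ ["number " ++ PySem.Int.toStr m ++ " is missing"])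
      r.1

-- ===== PRECONDITION & SPEC =====
def Spec_detect_issues (seq : List Int) (out : List String) : Prop := out = detect_issues_alt seq
instance (seq : List Int) (out : List String) : Decidable (Spec_detect_issues seq out) := by unfold Spec_detect_issues; infer_instance

-- ===== CLAIM (what is proved, stated in full; the proofs are below) =====
def Claim_equal_detect_issues : Prop := ∀ (seq : List Int), Dom_detect_issues seq → Spec_detect_issues seq (detect_issues seq)

-- ===== LEMMAS AND PROOFS =====

def pvRlspec : List Int → List Int
  | [] => []
  | [_] => [1]
  | x :: y :: t => (if x = y then (pvRlspec (y :: t)).headD 0 + 1 else 1) :: pvRlspec (y :: t)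

theorem pvRlspec_length (l : List Int) : (pvRlspec l).length = l.length := by
  induction l with
  | nil => rfl
  | cons x t ih =>
    cases t with
    | nil => rfl
    | cons y t => simp [pvRlspec] at ih ⊢; omega

theorem pvRlspec_head (x : Int) (t : List Int) :
    (pvRlspec (x :: t)).headD 0 = 1 + (t.takeWhile (fun z => z == x)).length := by
  induction t generalizing x with
  | nil => simp [pvRlspec]
  | cons y t' ih =>
    by_cases hxy : x = y
    · subst hxy
      have h0 := ih x
      simp [pvRlspec] at h0 ⊢
      omega
    · have hb : (y == x) = false := beq_eq_false_iff_ne.mpr (Ne.symm hxy)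
      simp [pvRlspec, hxy, hb]

theorem pvRlspec_getD (seq : List Int) (idx : Nat) (h : idx < seq.length) :
    (pvRlspec seq).getD idx 0 =
      1 + ((seq.drop (idx + 1)).takeWhile (fun x => x == seq.getD idx 0)).length := by
  induction seq generalizing idx with
  | nil => simp at h
  | cons x t ih =>
    cases idx with
    | zero =>
      have hne : pvRlspec (x :: t) ≠ [] := by
        have hl := pvRlspec_length (x :: t)
        intro hc; rw [hc] at hl; simp at hl
      have hg : (pvRlspec (x :: t)).getD 0 0 = (pvRlspec (x :: t)).headD 0 := by
        cases hpv : pvRlspec (x :: t) with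
        | nil => exact absurd hpv hne
        | cons a l => simp
      rw [hg, pvRlspec_head]
      simp
    | succ n =>
      cases t with
      | nil => simp at h
      | cons y t' =>
        have := ih n (by simpa using h)
        simpa [pvRlspec] using this

theorem pvRunLen_eq (seq : List Int) (v : Int) (j : Nat) (r : Int) :
    pvRunLen seq v j r = r + ((seq.drop (j + 1)).takeWhile (fun x => x == v)).length := by
  rw [pvRunLen]
  split
  · rename_i h
    rw [pvRunLen_eq seq v (j + 1) (r + 1)]
    have hd : seq.drop (j + 1) = seq[j + 1] :: seq.drop (j + 1 + 1) :=
      List.drop_eq_getElem_cons h.1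
    have hv : seq[j + 1] = v := by
      have := List.getD_eq_getElem seq 0 h.1
      rw [← this]; exact h.2
    rw [hd, hv]
    simp
    omega
  · rename_i h
    rw [not_and_or] at h
    rcases h with h | h
    · have : seq.drop (j + 1) = [] := List.drop_eq_nil_of_le (by omega)
      simp [this]
    · rcases Nat.lt_or_ge (j + 1) seq.length with hlt | hge
      · have hd : seq.drop (j + 1) = seq[j + 1] :: seq.drop (j + 2) :=
          List.drop_eq_getElem_cons hlt
        have hv : seq[j + 1] ≠ v := by
          have := List.getD_eq_getElem seq 0 hlt
          rw [← this]; exact h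
        have hb : (seq[j + 1] == v) = false := beq_eq_false_iff_ne.mpr hv
        rw [hd]
        simp [hb]
      · have : seq.drop (j + 1) = [] := List.drop_eq_nil_of_le hge
        simp [this]
termination_by seq.length - j
decreasing_by omega

theorem pvBuildRunlen_fold (seq : List Int) (m : Nat) (hm : m + 1 ≤ seq.length) :
    (PySem.List.pyRange ((m : Int) - 1) (-1) (-1)).foldl
      (fun acc i =>
        acc ++ [if PySem.List.pyGetD seq i 0 = PySem.List.pyGetD seq (i + 1) 0 then
                  PySem.List.pyGetD acc (-1) 0 + 1
                else 1])
      ((pvRlspec (seq.drop m)).reverse) = (pvRlspec seq).reverse := by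
  induction m with
  | zero =>
    rw [PySem.List.pyRange_neg_one_eq_nil (by omega)]
    simp
  | succ n ih =>
    have h1 : ((n + 1 : Nat) : Int) - 1 = (n : Int) := by push_cast; ring
    rw [h1, PySem.List.pyRange_neg_one_cons (by omega)]
    rw [List.foldl_cons]
    have hlt : n + 1 < seq.length := by omega
    have hd1 : seq.drop n = seq[n] :: seq.drop (n + 1) :=
      List.drop_eq_getElem_cons (by omega)
    have hd2 : seq.drop (n + 1) = seq[n + 1] :: seq.drop (n + 2) :=
      List.drop_eq_getElem_cons hlt
    have hne : pvRlspec (seq.drop (n + 1)) ≠ [] := by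
      have hl := pvRlspec_length (seq.drop (n + 1))
      intro hc; rw [hc] at hl
      simp at hl
      omega
    have hstep :
        (pvRlspec (seq.drop (n + 1))).reverse ++
          [if PySem.List.pyGetD seq (n : Int) 0 = PySem.List.pyGetD seq ((n : Int) + 1) 0 then
             PySem.List.pyGetD ((pvRlspec (seq.drop (n + 1))).reverse) (-1) 0 + 1
           else 1] = (pvRlspec (seq.drop n)).reverse := by
      have hg1 : PySem.List.pyGetD seq (n : Int) 0 = seq[n] := by
        rw [PySem.List.pyGetD_natCast]
        exact List.getD_eq_getElem seq 0 (by omega)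
      have hg2 : PySem.List.pyGetD seq ((n : Int) + 1) 0 = seq[n + 1] := by
        have hc : ((n : Int) + 1) = ((n + 1 : Nat) : Int) := by push_cast; ring
        rw [hc, PySem.List.pyGetD_natCast]
        exact List.getD_eq_getElem seq 0 hlt
      have hlast : PySem.List.pyGetD ((pvRlspec (seq.drop (n + 1))).reverse) (-1) 0 =
          (pvRlspec (seq.drop (n + 1))).headD 0 := by
        rw [PySem.List.pyGetD_neg_one _ _ (by simpa using hne), List.getLast_reverse]
        rw [show (pvRlspec (seq.drop (n + 1))).headD 0 =
              ((pvRlspec (seq.drop (n + 1))).head?).getD 0 from by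
                cases pvRlspec (seq.drop (n + 1)) <;> rfl,
            List.head?_eq_some_head hne]
        rfl
      rw [hg1, hg2, hlast, hd1]
      rw [hd2]
      show (pvRlspec (seq[n + 1] :: seq.drop (n + 2))).reverse ++ _ =
        (pvRlspec (seq[n] :: seq[n + 1] :: seq.drop (n + 2))).reverse
      simp [pvRlspec]
    rw [hstep]
    exact ih (by omega)

theorem pvBuildRunlen_eq (seq : List Int) (h : seq ≠ []) : pvBuildRunlen seq = pvRlspec seq := by
  have hlen : 1 ≤ seq.length := List.length_pos_iff.mpr h
  have hinit : seq.drop (seq.length - 1) = [seq.getLast h] :=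
    List.drop_length_sub_one h
  have h2 : ((seq.length : Int) - 2) = (((seq.length - 1 : Nat) : Int) - 1) := by
    push_cast [hlen]
    omega
  unfold pvBuildRunlen
  rw [h2]
  have hstart : ([1] : List Int) = (pvRlspec (seq.drop (seq.length - 1))).reverse := by
    rw [hinit]; rfl
  rw [hstart, pvBuildRunlen_fold seq (seq.length - 1) (by omega)]
  simp

def pvLdSpec (pre : List Int) : Option Int :=
  match pre.reverse with
  | [] => none
  | u :: r => r.find? (fun x => x != u)

theorem pv_getD_last (q : List Int) (u : Int) (w : List Int) :
    PySem.List.pyGetD ((q ++ [u]) ++ w) (((q ++ [u]).length : Int) - 1) 0 = u := by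
  have hc : (((q ++ [u]).length : Int) - 1) = ((q.length : Nat) : Int) := by
    simp
  rw [hc, PySem.List.pyGetD_natCast, List.append_assoc]
  rw [List.getD_eq_getElem?_getD, List.getElem?_append_right (le_refl _)]
  simp

theorem pv_head_eq (q : List Int) (u : Int) (w : List Int) (v : Int)
    (hq : ∀ x ∈ q, x = v) (huv : u = v) :
    PySem.List.pyGetD (q ++ u :: w) 0 0 = v := by
  rw [show (0 : Int) = ((0 : Nat) : Int) from rfl, PySem.List.pyGetD_natCast]
  cases q with
  | nil => simpa using huv
  | cons c t => simpa using hq c (by simp)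

theorem pv_pred_eq (q w : List Int) (u v : Int) :
    (match pvFirstDiffRev
        (PySem.List.slice ((q ++ [u]) ++ w) none (some (((q ++ [u]).length : Nat) : Int))) v with
     | some p => p
     | none =>
       if 0 < (q ++ [u]).length ∧ PySem.List.pyGetD ((q ++ [u]) ++ w) 0 0 ≠ v then
         PySem.List.pyGetD ((q ++ [u]) ++ w) 0 0
       else 0)
    = (if PySem.List.pyGetD ((q ++ [u]) ++ w) (((q ++ [u]).length : Int) - 1) 0 ≠ v then
         PySem.List.pyGetD ((q ++ [u]) ++ w) (((q ++ [u]).length : Int) - 1) 0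
       else match pvLdSpec (q ++ [u]) with | some p => p | none => 0) := by
  rw [pv_getD_last, PySem.List.slice_to_natCast, List.take_left]
  unfold pvFirstDiffRev pvLdSpec
  by_cases huv : u = v
  · subst huv
    simp only [List.reverse_append, List.reverse_singleton, List.singleton_append,
      List.find?_cons, bne_self_eq_false]
    cases hf : q.reverse.find? (fun x => x != u) with
    | some p => simp
    | none =>
      have hq : ∀ x ∈ q, x = u := by
        intro x hx
        have := List.find?_eq_none.mp hf x (by simpa using hx)
        simpa using this
      have hh : PySem.List.pyGetD (q ++ u :: w) 0 0 = u := pv_head_eq q u w u hq rfl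
      simp [hh]
  · have hb : (u != v) = true := by simpa using huv
    simp only [List.reverse_append, List.reverse_singleton, List.singleton_append,
      List.find?_cons, hb]
    simp [huv]

theorem pv_ld_step (q w : List Int) (u v : Int) :
    (if 0 < (q ++ [u]).length ∧
          PySem.List.pyGetD ((q ++ [u]) ++ w) (((q ++ [u]).length : Int) - 1) 0 ≠ v then
       some (PySem.List.pyGetD ((q ++ [u]) ++ w) (((q ++ [u]).length : Int) - 1) 0)
     else pvLdSpec (q ++ [u])) = pvLdSpec ((q ++ [u]) ++ [v]) := by
  rw [pv_getD_last]
  unfold pvLdSpec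
  by_cases huv : u = v
  · subst huv
    simp only [List.reverse_append, List.reverse_singleton, List.singleton_append,
      List.find?_cons, bne_self_eq_false]
    simp
  · have hb : (u != v) = true := by simpa using huv
    simp [List.reverse_append, hb, huv]

theorem pv_run_eq (pre rest : List Int) (v : Int) :
    pvRunLen (pre ++ v :: rest) v pre.length 1
      = PySem.List.pyGetD (pvRlspec (pre ++ v :: rest)) ((pre.length : Nat) : Int) 0 := by
  rw [PySem.List.pyGetD_natCast]
  have hlt : pre.length < (pre ++ v :: rest).length := by simp
  have hgd : (pre ++ v :: rest).getD pre.length 0 = v := by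
    rw [List.getD_eq_getElem?_getD, List.getElem?_append_right (le_refl _)]
    simp
  rw [pvRunLen_eq, pvRlspec_getD _ pre.length hlt, hgd]

theorem pvMissing_fold (idx : Nat) (l : List Int) :
    ∀ (issues : List (Nat × String)) (rep : PySem.Set Int),
    ((l.foldl (fun (st : List (Nat × String) × PySem.Set Int) m =>
        if PySem.Set.contains st.2 m then st
        else (st.1 ++ [(idx, "number " ++ PySem.Int.toStr m ++ " is missing")],
              PySem.Set.add st.2 m)) (issues, rep)).1.map Prod.snd
      = (l.foldl (fun (st : List String × PySem.Set Int) m =>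
          if PySem.Set.contains st.2 m then st
          else (st.1 ++ ["number " ++ PySem.Int.toStr m ++ " is missing"],
                PySem.Set.add st.2 m)) (issues.map Prod.snd, rep)).1)
    ∧ ((l.foldl (fun (st : List (Nat × String) × PySem.Set Int) m =>
        if PySem.Set.contains st.2 m then st
        else (st.1 ++ [(idx, "number " ++ PySem.Int.toStr m ++ " is missing")],
              PySem.Set.add st.2 m)) (issues, rep)).2
      = (l.foldl (fun (st : List String × PySem.Set Int) m =>
          if PySem.Set.contains st.2 m then st
          else (st.1 ++ ["number " ++ PySem.Int.toStr m ++ " is missing"],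
                PySem.Set.add st.2 m)) (issues.map Prod.snd, rep)).2)
    ∧ ((issues.Pairwise (fun a b => a.1 ≤ b.1) ∧ ∀ p ∈ issues, p.1 ≤ idx) →
        ((l.foldl (fun (st : List (Nat × String) × PySem.Set Int) m =>
            if PySem.Set.contains st.2 m then st
            else (st.1 ++ [(idx, "number " ++ PySem.Int.toStr m ++ " is missing")],
                  PySem.Set.add st.2 m)) (issues, rep)).1.Pairwise (fun a b => a.1 ≤ b.1)
          ∧ ∀ p ∈ (l.foldl (fun (st : List (Nat × String) × PySem.Set Int) m =>
              if PySem.Set.contains st.2 m then st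
              else (st.1 ++ [(idx, "number " ++ PySem.Int.toStr m ++ " is missing")],
                    PySem.Set.add st.2 m)) (issues, rep)).1, p.1 ≤ idx)) := by
  induction l with
  | nil => exact fun issues rep => ⟨rfl, rfl, fun h => h⟩
  | cons m t ih =>
    intro issues rep
    simp only [List.foldl_cons]
    cases hc : PySem.Set.contains rep m with
    | true =>
      simp only [if_pos]
      exact ih issues rep
    | false =>
      simp only [Bool.false_eq_true, if_neg, not_false_eq_true]
      have h := ih (issues ++ [(idx, "number " ++ PySem.Int.toStr m ++ " is missing")])
        (PySem.Set.add rep m)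
      rw [List.map_append] at h
      refine ⟨h.1, h.2.1, fun hpb => h.2.2 ⟨?_, ?_⟩⟩
      · refine List.pairwise_append.mpr ⟨hpb.1, by simp, ?_⟩
        intro a ha b hb
        simp at hb
        rw [hb]
        exact hpb.2 a ha
      · intro p hp
        rcases List.mem_append.mp hp with hp | hp
        · exact hpb.2 p hp
        · simp at hp
          rw [hp]

theorem pvLoop_eq (seq : List Int) :
    ∀ (rem pre : List Int) (issues : List (Nat × String)) (pe : Int) (reported : PySem.Set Int),
    seq = pre ++ rem → pre ≠ [] →
    ((pvLoopA seq rem pre.length issues pe (PySem.Set.ofList pre) reported).1.map Prod.snd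
        = (pvLoopB seq (pvRlspec seq) rem pre.length (issues.map Prod.snd) pe
            (PySem.Set.ofList pre) reported (pvLdSpec pre)).1
      ∧ (pvLoopA seq rem pre.length issues pe (PySem.Set.ofList pre) reported).2
        = (pvLoopB seq (pvRlspec seq) rem pre.length (issues.map Prod.snd) pe
            (PySem.Set.ofList pre) reported (pvLdSpec pre)).2
      ∧ ((issues.Pairwise (fun a b => a.1 ≤ b.1) ∧ ∀ p ∈ issues, p.1 ≤ pre.length) →
          ((pvLoopA seq rem pre.length issues pe (PySem.Set.ofList pre) reported).1.Pairwise
              (fun a b => a.1 ≤ b.1)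
            ∧ ∀ p ∈ (pvLoopA seq rem pre.length issues pe (PySem.Set.ofList pre) reported).1,
                p.1 ≤ seq.length))) := by
  intro rem
  induction rem with
  | nil =>
    intro pre issues pe reported hseq hpre
    refine ⟨by simp [pvLoopA, pvLoopB], by simp [pvLoopA, pvLoopB],
      fun h => ⟨by simpa [pvLoopA] using h.1, ?_⟩⟩
    intro p hp
    simp only [pvLoopA] at hp
    have h1 := h.2 p hp
    have h2 : pre.length ≤ seq.length := by rw [hseq]; simp
    omega
  | cons v rest ih =>
    intro pre issues pe reported hseq hpre
    obtain ⟨q, u, hq⟩ : ∃ q u, pre = q ++ [u] := by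
      rcases List.eq_nil_or_concat pre with h | ⟨q, u, h⟩
      · exact absurd h hpre
      · exact ⟨q, u, by simpa [List.concat_eq_append] using h⟩
    have hpred : (match pvFirstDiffRev (PySem.List.slice seq none (some (pre.length : Int))) v with
        | some p => p
        | none =>
          if 0 < pre.length ∧ PySem.List.pyGetD seq 0 0 ≠ v then PySem.List.pyGetD seq 0 0
          else 0)
        = (if PySem.List.pyGetD seq ((pre.length : Int) - 1) 0 ≠ v then
             PySem.List.pyGetD seq ((pre.length : Int) - 1) 0
           else match pvLdSpec pre with | some p => p | none => 0) := by
      rw [hseq, hq]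
      exact pv_pred_eq q (v :: rest) u v
    have hrun : pvRunLen seq v pre.length 1
        = PySem.List.pyGetD (pvRlspec seq) ((pre.length : Nat) : Int) 0 := by
      rw [hseq, hq]
      exact pv_run_eq (q ++ [u]) rest v
    have hld : (if 0 < pre.length ∧ PySem.List.pyGetD seq ((pre.length : Int) - 1) 0 ≠ v then
          some (PySem.List.pyGetD seq ((pre.length : Int) - 1) 0)
        else pvLdSpec pre) = pvLdSpec (pre ++ [v]) := by
      rw [hseq, hq]
      exact pv_ld_step q (v :: rest) u v
    have hseq' : seq = (pre ++ [v]) ++ rest := by rw [hseq, List.append_assoc]; rfl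
    have hlen1 : (pre ++ [v]).length = pre.length + 1 := by simp
    have hlenpos : 0 < pre.length := List.length_pos_iff.mpr hpre
    simp only [pvLoopA, pvLoopB]
    rw [hpred, hrun, hld]
    generalize hS : ("number " ++ PySem.Int.toStr v ++ " is repeated " ++
        PySem.Int.toStr (PySem.List.pyGetD (pvRlspec seq) ((pre.length : Nat) : Int) 0) ++ " " ++
        (if PySem.List.pyGetD (pvRlspec seq) ((pre.length : Nat) : Int) 0 > 1 then "times"
         else "time")) ++ " after number " ++
        PySem.Int.toStr
          (if PySem.List.pyGetD seq ((pre.length : Int) - 1) 0 ≠ v then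
             PySem.List.pyGetD seq ((pre.length : Int) - 1) 0
           else match pvLdSpec pre with | some p => p | none => 0) = S
    have hAB : ∀ (issues' : List (Nat × String)) (pe' : Int) (rep' : PySem.Set Int),
        (List.map Prod.snd
            (pvLoopA seq rest (pre.length + 1) issues' pe'
              (PySem.Set.ofList (pre ++ [v])) rep').1
          = (pvLoopB seq (pvRlspec seq) rest (pre.length + 1) (List.map Prod.snd issues') pe'
              (PySem.Set.ofList (pre ++ [v])) rep' (pvLdSpec (pre ++ [v]))).1)
        ∧ ((pvLoopA seq rest (pre.length + 1) issues' pe'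
              (PySem.Set.ofList (pre ++ [v])) rep').2
          = (pvLoopB seq (pvRlspec seq) rest (pre.length + 1) (List.map Prod.snd issues') pe'
              (PySem.Set.ofList (pre ++ [v])) rep' (pvLdSpec (pre ++ [v]))).2)
        ∧ ((issues'.Pairwise (fun a b => a.1 ≤ b.1) ∧ ∀ p ∈ issues', p.1 ≤ pre.length + 1) →
            ((pvLoopA seq rest (pre.length + 1) issues' pe'
                (PySem.Set.ofList (pre ++ [v])) rep').1.Pairwise (fun a b => a.1 ≤ b.1)
              ∧ ∀ p ∈ (pvLoopA seq rest (pre.length + 1) issues' pe'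
                  (PySem.Set.ofList (pre ++ [v])) rep').1, p.1 ≤ seq.length)) := by
      intro issues' pe' rep'
      have h0 := ih (pre ++ [v]) issues' pe' rep' hseq' (by simp)
      rw [hlen1] at h0
      exact ⟨h0.1, h0.2.1, fun hyp => h0.2.2 ⟨hyp.1, fun p hp => by
        have := hyp.2 p hp; omega⟩⟩
    have hext1 : ∀ (issues' : List (Nat × String)) (s : String),
        (issues'.Pairwise (fun a b => a.1 ≤ b.1) ∧ ∀ p ∈ issues', p.1 ≤ pre.length) →
        ((issues' ++ [(pre.length, s)]).Pairwise (fun a b => a.1 ≤ b.1)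
          ∧ ∀ p ∈ issues' ++ [(pre.length, s)], p.1 ≤ pre.length) := by
      intro issues' str hyp
      constructor
      · refine List.pairwise_append.mpr ⟨hyp.1, by simp, ?_⟩
        intro a ha b hb
        rw [List.mem_singleton] at hb
        subst hb
        exact hyp.2 a ha
      · intro p hp
        rcases List.mem_append.mp hp with h | h
        · exact hyp.2 p h
        · rw [List.mem_singleton] at h
          subst h
          exact le_refl _
    have hext2 : ∀ (issues' : List (Nat × String)) (s1 s2 : String),
        (issues'.Pairwise (fun a b => a.1 ≤ b.1) ∧ ∀ p ∈ issues', p.1 ≤ pre.length) →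
        ((issues' ++ [(pre.length, s1), (pre.length, s2)]).Pairwise (fun a b => a.1 ≤ b.1)
          ∧ ∀ p ∈ issues' ++ [(pre.length, s1), (pre.length, s2)], p.1 ≤ pre.length) := by
      intro issues' s1 s2 hyp
      constructor
      · refine List.pairwise_append.mpr ⟨hyp.1, by simp, ?_⟩
        intro a ha b hb
        have hb1 : b.1 = pre.length := by
          rcases List.mem_cons.mp hb with h | h
          · rw [h]
          · rw [List.mem_singleton] at h; rw [h]
        rw [hb1]
        exact hyp.2 a ha
      · intro p hp
        rcases List.mem_append.mp hp with h | h
        · exact hyp.2 p h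
        · have : p.1 = pre.length := by
            rcases List.mem_cons.mp h with h | h
            · rw [h]
            · rw [List.mem_singleton] at h; rw [h]
          omega
    have hwk : ∀ (issues' : List (Nat × String)),
        (issues'.Pairwise (fun a b => a.1 ≤ b.1) ∧ ∀ p ∈ issues', p.1 ≤ pre.length) →
        (issues'.Pairwise (fun a b => a.1 ≤ b.1) ∧ ∀ p ∈ issues', p.1 ≤ pre.length + 1) :=
      fun issues' hyp => ⟨hyp.1, fun p hp => by have := hyp.2 p hp; omega⟩
    cases hmem : (PySem.Set.ofList pre).contains v with
    | true =>
      have hv : v ∈ pre := by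
        have := (PySem.Set.contains_iff (PySem.Set.ofList pre) v).mp hmem
        simpa using this
      have hseen : PySem.Set.ofList pre = PySem.Set.ofList (pre ++ [v]) := by
        rw [PySem.Set.ofList_append_singleton, PySem.Set.add_of_mem (by simpa using hv)]
      simp only [if_pos]
      by_cases hgt : v > pe
      · simp only [hgt, if_pos]
        have hm := pvMissing_fold pre.length (PySem.List.pyRange pe v 1)
          (issues ++ [(pre.length, S)]) reported
        simp only [List.map_append, List.map_cons, List.map_nil] at hm
        rw [← hm.1, ← hm.2.1, hseen]
        refine ⟨(hAB _ _ _).1, (hAB _ _ _).2.1, ?_⟩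
        intro hyp
        exact (hAB _ _ _).2.2 (hwk _ (hm.2.2 (hext1 issues S hyp)))
      · simp only [hgt, if_neg, not_false_eq_true]
        by_cases heq : v = pe
        · subst heq
          simp only [if_pos]
          rw [hseen, show List.map Prod.snd issues ++ [S]
              = List.map Prod.snd (issues ++ [(pre.length, S)]) from by simp]
          refine ⟨(hAB _ _ _).1, (hAB _ _ _).2.1, ?_⟩
          intro hyp
          exact (hAB _ _ _).2.2 (hwk _ (hext1 issues S hyp))
        · simp only [heq, if_neg, not_false_eq_true]
          by_cases hsw : v < PySem.List.pyGetD seq ((pre.length : Int) - 1) 0 ∧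
              PySem.List.pyGetD seq ((pre.length : Int) - 1) 0 - v = 1
          · rw [if_pos ⟨hlenpos, by omega, hsw.1⟩, if_pos hsw,
              min_eq_left (le_of_lt hsw.1), max_eq_right (le_of_lt hsw.1), hseen,
              show List.map Prod.snd issues ++ [S] ++
                  ["number " ++ PySem.Int.toStr v ++ " is switched in place with number " ++
                    PySem.Int.toStr (PySem.List.pyGetD seq ((pre.length : Int) - 1) 0),
                   "number " ++ PySem.Int.toStr (PySem.List.pyGetD seq ((pre.length : Int) - 1) 0) ++
                    " is switched in place with number " ++ PySem.Int.toStr v]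
                = List.map Prod.snd ((issues ++ [(pre.length, S)]) ++
                    [(pre.length, "number " ++ PySem.Int.toStr v ++
                        " is switched in place with number " ++
                        PySem.Int.toStr (PySem.List.pyGetD seq ((pre.length : Int) - 1) 0)),
                     (pre.length, "number " ++
                        PySem.Int.toStr (PySem.List.pyGetD seq ((pre.length : Int) - 1) 0) ++
                        " is switched in place with number " ++ PySem.Int.toStr v)])
                from by simp]
            refine ⟨(hAB _ _ _).1, (hAB _ _ _).2.1, ?_⟩
            intro hyp
            exact (hAB _ _ _).2.2 (hwk _ (hext2 _ _ _ (hext1 issues S hyp)))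
          · rw [if_neg (by intro hc; exact hsw ⟨hc.2.2, by omega⟩), if_neg hsw, hseen,
              show List.map Prod.snd issues ++ [S] ++
                  ["number " ++ PySem.Int.toStr v ++ " is out of place after number " ++
                    PySem.Int.toStr (PySem.List.pyGetD seq ((pre.length : Int) - 1) 0)]
                = List.map Prod.snd ((issues ++ [(pre.length, S)]) ++
                    [(pre.length, "number " ++ PySem.Int.toStr v ++
                        " is out of place after number " ++
                        PySem.Int.toStr (PySem.List.pyGetD seq ((pre.length : Int) - 1) 0))])
                from by simp]
            refine ⟨(hAB _ _ _).1, (hAB _ _ _).2.1, ?_⟩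
            intro hyp
            exact (hAB _ _ _).2.2 (hwk _ (hext1 _ _ (hext1 issues S hyp)))
    | false =>
      have hseen : (PySem.Set.ofList pre).add v = PySem.Set.ofList (pre ++ [v]) :=
        (PySem.Set.ofList_append_singleton pre v).symm
      simp only [Bool.false_eq_true, if_neg, not_false_eq_true]
      by_cases hgt : v > pe
      · simp only [hgt, if_pos]
        have hm := pvMissing_fold pre.length (PySem.List.pyRange pe v 1) issues reported
        rw [← hm.1, ← hm.2.1, hseen]
        refine ⟨(hAB _ _ _).1, (hAB _ _ _).2.1, ?_⟩
        intro hyp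
        exact (hAB _ _ _).2.2 (hwk _ (hm.2.2 hyp))
      · simp only [hgt, if_neg, not_false_eq_true]
        by_cases heq : v = pe
        · subst heq
          simp only [if_pos]
          rw [hseen]
          refine ⟨(hAB _ _ _).1, (hAB _ _ _).2.1, ?_⟩
          intro hyp
          exact (hAB _ _ _).2.2 (hwk _ hyp)
        · simp only [heq, if_neg, not_false_eq_true]
          by_cases hsw : v < PySem.List.pyGetD seq ((pre.length : Int) - 1) 0 ∧
              PySem.List.pyGetD seq ((pre.length : Int) - 1) 0 - v = 1
          · rw [if_pos ⟨hlenpos, by omega, hsw.1⟩, if_pos hsw,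
              min_eq_left (le_of_lt hsw.1), max_eq_right (le_of_lt hsw.1), hseen,
              show List.map Prod.snd issues ++
                  ["number " ++ PySem.Int.toStr v ++ " is switched in place with number " ++
                    PySem.Int.toStr (PySem.List.pyGetD seq ((pre.length : Int) - 1) 0),
                   "number " ++ PySem.Int.toStr (PySem.List.pyGetD seq ((pre.length : Int) - 1) 0) ++
                    " is switched in place with number " ++ PySem.Int.toStr v]
                = List.map Prod.snd (issues ++
                    [(pre.length, "number " ++ PySem.Int.toStr v ++
                        " is switched in place with number " ++
                        PySem.Int.toStr (PySem.List.pyGetD seq ((pre.length : Int) - 1) 0)),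
                     (pre.length, "number " ++
                        PySem.Int.toStr (PySem.List.pyGetD seq ((pre.length : Int) - 1) 0) ++
                        " is switched in place with number " ++ PySem.Int.toStr v)])
                from by simp]
            refine ⟨(hAB _ _ _).1, (hAB _ _ _).2.1, ?_⟩
            intro hyp
            exact (hAB _ _ _).2.2 (hwk _ (hext2 _ _ _ hyp))
          · rw [if_neg (by intro hc; exact hsw ⟨hc.2.2, by omega⟩), if_neg hsw, hseen,
              show List.map Prod.snd issues ++
                  ["number " ++ PySem.Int.toStr v ++ " is out of place after number " ++
                    PySem.Int.toStr (PySem.List.pyGetD seq ((pre.length : Int) - 1) 0)]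
                = List.map Prod.snd (issues ++
                    [(pre.length, "number " ++ PySem.Int.toStr v ++
                        " is out of place after number " ++
                        PySem.Int.toStr (PySem.List.pyGetD seq ((pre.length : Int) - 1) 0))])
                from by simp]
            refine ⟨(hAB _ _ _).1, (hAB _ _ _).2.1, ?_⟩
            intro hyp
            exact (hAB _ _ _).2.2 (hwk _ (hext1 _ _ hyp))

theorem pvTail_fold (n : Nat) (rep : PySem.Set Int) (l : List Int) :
    ∀ issues : List (Nat × String),
    ((l.foldl (fun acc m => if PySem.Set.contains rep m then acc
        else acc ++ [(n, "number " ++ PySem.Int.toStr m ++ " is missing")]) issues).map Prod.snd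
      = l.foldl (fun acc m => if PySem.Set.contains rep m then acc
        else acc ++ ["number " ++ PySem.Int.toStr m ++ " is missing"]) (issues.map Prod.snd))
    ∧ ((issues.Pairwise (fun a b => a.1 ≤ b.1) ∧ ∀ p ∈ issues, p.1 ≤ n) →
        ((l.foldl (fun acc m => if PySem.Set.contains rep m then acc
            else acc ++ [(n, "number " ++ PySem.Int.toStr m ++ " is missing")]) issues).Pairwise
              (fun a b => a.1 ≤ b.1)
          ∧ ∀ p ∈ (l.foldl (fun acc m => if PySem.Set.contains rep m then acc
              else acc ++ [(n, "number " ++ PySem.Int.toStr m ++ " is missing")]) issues),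
              p.1 ≤ n)) := by
  induction l with
  | nil => exact fun issues => ⟨rfl, fun h => h⟩
  | cons m tl ih =>
    intro issues
    simp only [List.foldl_cons]
    cases hc : PySem.Set.contains rep m with
    | true =>
      simp only [if_pos]
      exact ih issues
    | false =>
      simp only [Bool.false_eq_true, if_neg, not_false_eq_true]
      have h := ih (issues ++ [(n, "number " ++ PySem.Int.toStr m ++ " is missing")])
      simp only [List.map_append, List.map_cons, List.map_nil] at h
      refine ⟨h.1, fun hyp => h.2 ⟨?_, ?_⟩⟩
      · refine List.pairwise_append.mpr ⟨hyp.1, by simp, ?_⟩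
        intro a ha b hb
        rw [List.mem_singleton] at hb
        subst hb
        exact hyp.2 a ha
      · intro p hp
        rcases List.mem_append.mp hp with h' | h'
        · exact hyp.2 p h'
        · rw [List.mem_singleton] at h'
          subst h'
          exact le_refl _

theorem detect_issues_spec' (seq : List Int) : detect_issues seq = detect_issues_alt seq := by
  cases seq with
  | nil => rfl
  | cons v0 t =>
    simp only [detect_issues, detect_issues_alt]
    rw [pvBuildRunlen_eq _ (by simp)]
    simp only [pvLoopA, pvLoopB]
    rw [PySem.List.pyGetD_zero_cons]
    have hce : PySem.Set.contains PySem.Set.empty v0 = false := rfl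
    simp only [hce, Bool.false_eq_true, if_neg, not_false_eq_true, gt_iff_lt,
      lt_self_iff_false, if_pos, false_and]
    rw [show (0 : Nat) + 1 = [(v0 : Int)].length from rfl,
      show PySem.Set.add PySem.Set.empty v0 = PySem.Set.ofList [v0] from rfl,
      show (none : Option Int) = pvLdSpec [v0] from rfl]
    obtain ⟨hL1, hL2, hL3⟩ :=
      pvLoop_eq (v0 :: t) t [v0] [] (v0 + 1) PySem.Set.empty rfl (by simp)
    simp only [List.map_nil] at hL1 hL2
    simp only [show (fun (x : Nat × String) => x.2) = (Prod.snd : Nat × String → String)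
      from rfl, show (fun (x : Nat × String) => x.1) = (Prod.fst : Nat × String → Nat) from rfl]
    rw [← hL1, ← hL2]
    have hT := pvTail_fold (v0 :: t).length
      (pvLoopA (v0 :: t) t [v0].length [] (v0 + 1) (PySem.Set.ofList [v0]) PySem.Set.empty).2.2
      (PySem.List.pyRange
        (pvLoopA (v0 :: t) t [v0].length [] (v0 + 1) (PySem.Set.ofList [v0]) PySem.Set.empty).2.1
        (PySem.List.pyGetD (v0 :: t) (-1) 0 + 1) 1)
      (pvLoopA (v0 :: t) t [v0].length [] (v0 + 1) (PySem.Set.ofList [v0]) PySem.Set.empty).1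
    rw [← hT.1]
    have hPB := hL3 ⟨List.Pairwise.nil, by simp⟩
    have hPW := hT.2 hPB
    rw [PySem.List.sorted_eq_self_of_pairwise _ _ hPW.1]

-- ===== VERDICT (by name: the statement is the Claim_ definition above) =====
theorem detect_issues_spec : Claim_equal_detect_issues := by
  intro seq _
  unfold Spec_detect_issues
  exact detect_issues_spec' seq
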